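-- pv_equiv track=rewrite | github.com/keiners/adventofcode | 2021/day10/app.py | part2
-- ===== SOURCE A (Python) =====
-- def part2(lines):
--     score_by_symbol = {"(": 1, "[": 2, "{": 3, "<": 4}
--     scores = []
--     for line in lines:
--         score = 0
--         for c in line[::-1]:
--             score = score * 5
--             score += score_by_symbol[c]
--         scores.append(score)
--     return sorted(scores)[int(len(scores)/2)]
-- ===== SOURCE B (Python) =====
-- def part2(lines):
--     score_by_symbol = {"(": 1, "[": 2, "{": 3, "<": 4}
--     scores = []
--     for line in lines:
--         total, p = 0, 1
--         for c in line:
--             total += score_by_symbol[c] * p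
--             p *= 5
--         scores.append(total)
--     # lower median = k-th smallest, found by iterative quickselect (no sorting)
--     k, xs = len(scores) // 2, scores
--     while True:
--         pivot = xs[0]
--         less = [x for x in xs if x < pivot]
--         if k < len(less):
--             xs = less
--             continue
--         greater = [x for x in xs if x > pivot]
--         if k < len(xs) - len(greater):
--             return pivot
--         k -= len(xs) - len(greater)
--         xs = greater
-- ===== Notes on version B (the rewrite author's own statement) =====
-- stated objective: alternative
-- what changed: B finds the lower median by an iterative quickselect (three-way partition around the first element, k-th smallest) instead of sorting the score list, and scores each line in one forward pass with a running power-of-5 accumulator instead of a reversed-string Horner loop.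
-- outside the precondition, e.g. on part2([]): A raises IndexError, B raises IndexError
import Mathlib
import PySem

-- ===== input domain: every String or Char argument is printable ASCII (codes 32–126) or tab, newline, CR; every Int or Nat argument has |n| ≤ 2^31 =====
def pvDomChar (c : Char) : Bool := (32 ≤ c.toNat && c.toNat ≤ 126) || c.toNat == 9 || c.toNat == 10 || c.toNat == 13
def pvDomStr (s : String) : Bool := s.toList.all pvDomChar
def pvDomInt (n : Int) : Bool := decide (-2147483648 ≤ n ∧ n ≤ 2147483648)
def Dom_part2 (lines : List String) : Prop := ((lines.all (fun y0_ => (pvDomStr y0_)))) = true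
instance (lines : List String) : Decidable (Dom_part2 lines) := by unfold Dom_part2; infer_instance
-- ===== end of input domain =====

-- B finds the lower median by iterative quickselect (k-th smallest, no sorting) and scores each
-- line in one forward pass with a running power-of-5 accumulator (objective: alternative).

-- ===== PORT A =====
-- score_by_symbol; lookup failure (KeyError) is excluded by Pre_part2, so .getD 0 is never taken there
def pvDictA : PySem.Dict Char Int := PySem.Dict.ofList [('(', 1), ('[', 2), ('{', 3), ('<', 4)]

def part2 (lines : List String) : Int :=
  let scores := lines.map (fun line =>
    (((PySem.Str.slice? line none none (-1)).getD "").toList).foldl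
      (fun score c => score * 5 + (pvDictA.get? c).getD 0) 0)
  -- sorted(scores)[int(len(scores)/2)]; empty `lines` (IndexError) is excluded by Pre_part2
  (PySem.List.pyGet? (PySem.List.sorted scores (fun x => x) false)
      ((scores.length : Int) / 2)).getD 0

-- ===== PORT B =====
-- iterative quickselect while-loop from Source B, as the obvious recursion on the shrinking list;
-- the `[] => 0` arm is Python's IndexError on `xs[0]` (empty `lines`), excluded by Pre_part2
def pvSelect : List Int → Int → Int
  | [], _ => 0
  | pivot :: t, k =>
    let xs := pivot :: t
    let less := xs.filter (fun x => x < pivot)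
    if k < (less.length : Int) then pvSelect less k
    else
      let greater := xs.filter (fun x => pivot < x)
      if k < (xs.length : Int) - (greater.length : Int) then pivot
      else pvSelect greater (k - ((xs.length : Int) - (greater.length : Int)))
termination_by xs _ => xs.length
decreasing_by
  · show (List.filter (fun x => decide (x < pivot)) (pivot :: t)).length < (pivot :: t).length
    exact List.length_filter_lt_length_iff_exists.mpr ⟨pivot, by simp, by simp⟩
  · show (List.filter (fun x => decide (pivot < x)) (pivot :: t)).length < (pivot :: t).length
    exact List.length_filter_lt_length_iff_exists.mpr ⟨pivot, by simp, by simp⟩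

def part2_alt (lines : List String) : Int :=
  let scores := lines.map (fun line =>
    (line.toList.foldl (fun tp c => (tp.1 + (pvDictA.get? c).getD 0 * tp.2, tp.2 * 5))
      ((0 : Int), (1 : Int))).1)
  pvSelect scores ((scores.length : Int) / 2)

-- ===== PRECONDITION & SPEC =====
-- Pre_ excludes exactly the inputs where Python A raises: an empty list (IndexError on sorted([])[0])
-- and any line containing a character outside "([{<" (KeyError); B raises on the same inputs.
def Pre_part2 (lines : List String) : Prop :=
  lines ≠ [] ∧ (lines.all (fun l => l.toList.all (fun c => c ∈ ['(', '[', '{', '<']))) = true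
instance (lines : List String) : Decidable (Pre_part2 lines) := by unfold Pre_part2; infer_instance
def pvWitness_part2 : List String := ["([", "", "<{<"]

def Spec_part2 (lines : List String) (out : Int) : Prop := out = part2_alt lines
instance (lines : List String) (out : Int) : Decidable (Spec_part2 lines out) := by unfold Spec_part2; infer_instance

-- ===== CLAIM (what is proved, stated in full; the proofs are below) =====
def Claim_equal_part2 : Prop := ∀ (lines : List String), Dom_part2 lines → Pre_part2 lines → Spec_part2 lines (part2 lines)

-- ===== LEMMAS AND PROOFS =====

-- forward running-power pass equals the reversed-string Horner fold
theorem pvFwd (f : Char → Int) :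
    ∀ (l : List Char) (t p : Int),
      (l.foldl (fun tp c => (tp.1 + f c * tp.2, tp.2 * 5)) (t, p)).1
        = t + (l.reverse.foldl (fun s c => s * 5 + f c) 0) * p := by
  intro l
  induction l with
  | nil => intro t p; simp
  | cons a tl ih =>
      intro t p
      rw [List.foldl_cons, ih]
      simp only [List.reverse_cons, List.foldl_append, List.foldl_cons, List.foldl_nil]
      ring

theorem pvLine_eq (line : String) :
    (((PySem.Str.slice? line none none (-1)).getD "").toList).foldl
        (fun score c => score * 5 + (pvDictA.get? c).getD 0) 0
      = (line.toList.foldl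
          (fun tp c => (tp.1 + (pvDictA.get? c).getD 0 * tp.2, tp.2 * 5)) ((0 : Int), (1 : Int))).1 := by
  rw [PySem.Str.slice?_none_none_neg_one]
  rw [pvFwd (fun c => (pvDictA.get? c).getD 0) line.toList 0 1]
  simp

-- count abbreviations
def pvCLt (xs : List Int) (v : Int) : Nat := xs.countP (fun x => decide (x < v))
def pvCLe (xs : List Int) (v : Int) : Nat := xs.countP (fun x => decide (x ≤ v))

theorem pvCountP_split (l : List Int) (q r : Int → Bool) :
    l.countP q = (l.filter r).countP q + (l.filter (fun x => !r x)).countP q := by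
  induction l with
  | nil => simp
  | cons a t ih =>
      by_cases hr : r a <;> by_cases hq : q a <;>
        simp [hr, hq, ih] <;> omega

-- pvSelect returns a member of its list
theorem pvSelect_mem : ∀ (xs : List Int) (k : Int), 0 ≤ k → k < (xs.length : Int) →
    pvSelect xs k ∈ xs := by
  intro xs k
  fun_induction pvSelect xs k with
  | case1 => intro h0 h; exact absurd h0 (by simp at h; omega)
  | case2 pivot t k xs less h ih =>
      intro hk0 _
      exact List.mem_of_mem_filter (ih hk0 h)
  | case3 pivot t k xs less h greater h2 =>
      intro _ _
      exact List.mem_cons_self ..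
  | case4 pivot t k xs less h greater h2 ih =>
      intro hk0 hkl
      have hg : greater.length ≤ (pivot :: t).length := List.length_filter_le _ _
      have hxlen : xs.length = (pivot :: t).length := rfl
      exact List.mem_of_mem_filter (ih (by omega) (by omega))

-- complement split of a filter's length
theorem pvLen_split (l : List Int) (r : Int → Bool) :
    (l.filter r).length + (l.filter (fun x => !r x)).length = l.length := by
  induction l with
  | nil => simp
  | cons a t ih => by_cases hr : r a <;> simp [hr] <;> omega

-- pvSelect's result has the k-th-smallest counting property
theorem pvSelect_bounds : ∀ (xs : List Int) (k : Int), 0 ≤ k → k < (xs.length : Int) →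
    (pvCLt xs (pvSelect xs k) : Int) ≤ k ∧ k < (pvCLe xs (pvSelect xs k) : Int) := by
  intro xs k
  fun_induction pvSelect xs k with
  | case1 => intro h0 h; exact absurd h0 (by simp at h; omega)
  | case2 pivot t k xs less h ih =>
      intro hk0 _
      have hm : pvSelect less k ∈ (pivot :: t).filter (fun x => decide (x < pivot)) :=
        pvSelect_mem less k hk0 h
      have hvp : pvSelect less k < pivot := by
        have := (List.mem_filter.mp hm).2; simpa using this
      obtain ⟨ih1, ih2⟩ := ih hk0 h
      have hsLt := pvCountP_split (pivot :: t)
        (fun x => decide (x < pvSelect less k)) (fun x => decide (x < pivot))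
      have hsLe := pvCountP_split (pivot :: t)
        (fun x => decide (x ≤ pvSelect less k)) (fun x => decide (x < pivot))
      have hzLt : ((pivot :: t).filter (fun x => !decide (x < pivot))).countP
          (fun x => decide (x < pvSelect less k)) = 0 := by
        rw [List.countP_eq_zero]
        intro a ha
        have := (List.mem_filter.mp ha).2
        simp at this ⊢; omega
      have hzLe : ((pivot :: t).filter (fun x => !decide (x < pivot))).countP
          (fun x => decide (x ≤ pvSelect less k)) = 0 := by
        rw [List.countP_eq_zero]
        intro a ha
        have := (List.mem_filter.mp ha).2
        simp at this ⊢; omega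
      have c1 : less.countP (fun x => decide (x < pvSelect less k)) =
          ((pivot :: t).filter (fun x => decide (x < pivot))).countP
            (fun x => decide (x < pvSelect less k)) := rfl
      have c2 : less.countP (fun x => decide (x ≤ pvSelect less k)) =
          ((pivot :: t).filter (fun x => decide (x < pivot))).countP
            (fun x => decide (x ≤ pvSelect less k)) := rfl
      constructor
      · rw [show pvCLt xs (pvSelect less k) = pvCLt (pivot :: t) (pvSelect less k) from rfl]
        unfold pvCLt at *; omega
      · rw [show pvCLe xs (pvSelect less k) = pvCLe (pivot :: t) (pvSelect less k) from rfl]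
        unfold pvCLe at *; omega
  | case3 pivot t k xs less h greater h2 =>
      intro hk0 hkl
      have e1 : pvCLt (pivot :: t) pivot =
          ((pivot :: t).filter (fun x => decide (x < pivot))).length := by
        unfold pvCLt; exact List.countP_eq_length_filter ..
      have hsLe := pvCountP_split (pivot :: t)
        (fun x => decide (x ≤ pivot)) (fun x => decide (pivot < x))
      have hzLe : ((pivot :: t).filter (fun x => decide (pivot < x))).countP
          (fun x => decide (x ≤ pivot)) = 0 := by
        rw [List.countP_eq_zero]
        intro a ha
        have := (List.mem_filter.mp ha).2
        simp at this ⊢; omega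
      have hallLe : ((pivot :: t).filter (fun x => !decide (pivot < x))).countP
          (fun x => decide (x ≤ pivot)) =
          ((pivot :: t).filter (fun x => !decide (pivot < x))).length := by
        rw [List.countP_eq_length]
        intro a ha
        have := (List.mem_filter.mp ha).2
        simp at this ⊢; omega
      have hlen := pvLen_split (pivot :: t) (fun x => decide (pivot < x))
      have hxlen : xs.length = (pivot :: t).length := rfl
      have hless : less.length =
          ((pivot :: t).filter (fun x => decide (x < pivot))).length := rfl
      have hgr : greater.length =
          ((pivot :: t).filter (fun x => decide (pivot < x))).length := rfl
      constructor
      · rw [show pvCLt xs pivot = pvCLt (pivot :: t) pivot from rfl, e1]; omega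
      · rw [show pvCLe xs pivot = pvCLe (pivot :: t) pivot from rfl]; unfold pvCLe; omega
  | case4 pivot t k xs less h greater h2 ih =>
      intro hk0 hkl
      have hg : greater.length ≤ (pivot :: t).length := List.length_filter_le _ _
      have hxlen : xs.length = (pivot :: t).length := rfl
      have hk0' : (0 : Int) ≤ k - ((xs.length : Int) - (greater.length : Int)) := by omega
      have hk' : k - ((xs.length : Int) - (greater.length : Int)) < (greater.length : Int) := by
        omega
      obtain ⟨ih1, ih2⟩ := ih hk0' hk'
      have hm : pvSelect greater (k - ((xs.length : Int) - (greater.length : Int))) ∈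
          (pivot :: t).filter (fun x => decide (pivot < x)) :=
        pvSelect_mem greater _ hk0' hk'
      set v := pvSelect greater (k - ((xs.length : Int) - (greater.length : Int))) with hv
      have hpv : pivot < v := by
        have := (List.mem_filter.mp hm).2; simpa using this
      have hsLt := pvCountP_split (pivot :: t)
        (fun x => decide (x < v)) (fun x => decide (pivot < x))
      have hsLe := pvCountP_split (pivot :: t)
        (fun x => decide (x ≤ v)) (fun x => decide (pivot < x))
      have hallLt : ((pivot :: t).filter (fun x => !decide (pivot < x))).countP
          (fun x => decide (x < v)) =
          ((pivot :: t).filter (fun x => !decide (pivot < x))).length := by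
        rw [List.countP_eq_length]
        intro a ha
        have := (List.mem_filter.mp ha).2
        simp at this ⊢; omega
      have hallLe : ((pivot :: t).filter (fun x => !decide (pivot < x))).countP
          (fun x => decide (x ≤ v)) =
          ((pivot :: t).filter (fun x => !decide (pivot < x))).length := by
        rw [List.countP_eq_length]
        intro a ha
        have := (List.mem_filter.mp ha).2
        simp at this ⊢; omega
      have hlen := pvLen_split (pivot :: t) (fun x => decide (pivot < x))
      have hgr : greater.length =
          ((pivot :: t).filter (fun x => decide (pivot < x))).length := rfl
      have c1 : greater.countP (fun x => decide (x < v)) =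
          ((pivot :: t).filter (fun x => decide (pivot < x))).countP
            (fun x => decide (x < v)) := rfl
      have c2 : greater.countP (fun x => decide (x ≤ v)) =
          ((pivot :: t).filter (fun x => decide (pivot < x))).countP
            (fun x => decide (x ≤ v)) := rfl
      constructor
      · rw [show pvCLt xs v = pvCLt (pivot :: t) v from rfl]
        unfold pvCLt at *; omega
      · rw [show pvCLe xs v = pvCLe (pivot :: t) v from rfl]
        unfold pvCLe at *; omega

-- the k-th element of a sorted (≤-pairwise) list has the same counting property
theorem pvSorted_bounds (s : List Int) (hs : s.Pairwise (· ≤ ·)) (k : Nat) (hk : k < s.length) :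
    pvCLt s s[k] ≤ k ∧ k < pvCLe s s[k] := by
  have hpw := List.pairwise_iff_getElem.mp hs
  constructor
  · have hsplit : (s.take k).countP (fun x => decide (x < s[k])) +
        (s.drop k).countP (fun x => decide (x < s[k])) =
        s.countP (fun x => decide (x < s[k])) := by
      rw [← List.countP_append, List.take_append_drop]
    have h1 : (s.take k).countP (fun x => decide (x < s[k])) ≤ k :=
      le_trans List.countP_le_length (by rw [List.length_take]; omega)
    have h2 : (s.drop k).countP (fun x => decide (x < s[k])) = 0 := by
      rw [List.countP_eq_zero]
      intro a ha
      obtain ⟨i, hi, rfl⟩ := List.mem_iff_getElem.mp ha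
      rw [List.getElem_drop]
      have hle : s[k] ≤ s[k + i]'(by simp at hi; omega) := by
        rcases Nat.eq_zero_or_pos i with rfl | h0
        · simp
        · exact hpw k (k + i) hk (by simp at hi; omega) (by omega)
      simp; omega
    unfold pvCLt; omega
  · have hsplit : (s.take (k + 1)).countP (fun x => decide (x ≤ s[k])) +
        (s.drop (k + 1)).countP (fun x => decide (x ≤ s[k])) =
        s.countP (fun x => decide (x ≤ s[k])) := by
      rw [← List.countP_append, List.take_append_drop]
    have hall : (s.take (k + 1)).countP (fun x => decide (x ≤ s[k])) =
        (s.take (k + 1)).length := by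
      rw [List.countP_eq_length]
      intro a ha
      obtain ⟨i, hi, rfl⟩ := List.mem_iff_getElem.mp ha
      rw [List.getElem_take]
      have hik : i ≤ k := by simp at hi; omega
      have : s[i]'(by simp at hi; omega) ≤ s[k] := by
        rcases Nat.lt_or_ge i k with hlt | hge
        · exact hpw i k (by omega) hk hlt
        · have : i = k := by omega
          subst this; exact le_refl _
      simpa using this
    have hlen : (s.take (k + 1)).length = k + 1 := by simp; omega
    unfold pvCLe; omega

-- uniqueness of the value with the counting property
theorem pvUnique (xs : List Int) (k : Int) (v w : Int)
    (hv : (pvCLt xs v : Int) ≤ k ∧ k < (pvCLe xs v : Int))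
    (hw : (pvCLt xs w : Int) ≤ k ∧ k < (pvCLe xs w : Int)) : v = w := by
  rcases lt_trichotomy v w with h | h | h
  · exfalso
    have : pvCLe xs v ≤ pvCLt xs w := by
      apply List.countP_mono_left
      intro a _ ha
      simp at ha ⊢; omega
    omega
  · exact h
  · exfalso
    have : pvCLe xs w ≤ pvCLt xs v := by
      apply List.countP_mono_left
      intro a _ ha
      simp at ha ⊢; omega
    omega

theorem pvSelect_eq_sorted (xs : List Int) (k : Nat) (hk : k < xs.length) :
    pvSelect xs (k : Int) = (PySem.List.sorted xs (fun x => x) false)[k]'(by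
      simpa [PySem.List.length_sorted] using hk) := by
  have hperm : (PySem.List.sorted xs (fun x => x) false).Perm xs := PySem.List.sorted_perm ..
  have hlen : (PySem.List.sorted xs (fun x => x) false).length = xs.length :=
    hperm.length_eq
  have hsb := pvSorted_bounds (PySem.List.sorted xs (fun x => x) false)
    (by simpa using PySem.List.sorted_pairwise xs (fun x => x)) k (by omega)
  have hvb := pvSelect_bounds xs (k : Int) (by positivity) (by exact_mod_cast hk)
  apply pvUnique xs (k : Int)
  · exact hvb
  · constructor
    · have : pvCLt (PySem.List.sorted xs (fun x => x) false) _ ≤ k := hsb.1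
      rw [show pvCLt xs _ = pvCLt (PySem.List.sorted xs (fun x => x) false) _ from
        (hperm.countP_eq _).symm]
      exact_mod_cast this
    · have : k < pvCLe (PySem.List.sorted xs (fun x => x) false) _ := hsb.2
      rw [show pvCLe xs _ = pvCLe (PySem.List.sorted xs (fun x => x) false) _ from
        (hperm.countP_eq _).symm]
      exact_mod_cast this

-- ===== VERDICT (by name: the statement is the Claim_ definition above) =====
theorem part2_spec : Claim_equal_part2 := by
  intro lines _ hpre
  unfold Spec_part2 part2 part2_alt
  rw [List.map_congr_left (fun line _ => pvLine_eq line)]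
  set scores := lines.map (fun line =>
    (line.toList.foldl (fun tp c => (tp.1 + (pvDictA.get? c).getD 0 * tp.2, tp.2 * 5))
      ((0 : Int), (1 : Int))).1) with hscores
  have hne : scores ≠ [] := by
    simp [hscores]
    exact hpre.1
  have hn : 0 < scores.length := List.length_pos_iff.mpr hne
  have hk : scores.length / 2 < scores.length := Nat.div_lt_self hn (by norm_num)
  have hcast : ((scores.length : Int) / 2) = ((scores.length / 2 : Nat) : Int) := by omega
  show (PySem.List.pyGet? (PySem.List.sorted scores (fun x => x)) ((scores.length : Int) / 2)).getD 0
      = pvSelect scores ((scores.length : Int) / 2)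
  rw [hcast, pvSelect_eq_sorted scores (scores.length / 2) hk,
    PySem.List.pyGet?_natCast, List.getElem?_eq_getElem
      (by rw [PySem.List.length_sorted]; exact hk)]
  rfl
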